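-- pv_equiv track=rewrite | github.com/pypi-data/pypi-mirror-403 | packages/flyto-core/flyto_core-2.0.2-py3-none-any.whl/core/catalog/module.py | get_suggested_workflow
-- ===== SOURCE A (Python) =====
-- from typing import Dict, Any, Optional, List
--
-- def get_suggested_workflow(
--     task_description: str,
--     max_steps: int = 5,
-- ) -> List[Dict[str, Any]]:
--     """
--     Suggest a workflow based on task description.
--
--     This is a simple heuristic-based suggestion.
--     For better results, use LLM with get_outline -> get_category_detail flow.
--
--     Args:
--         task_description: What the user wants to accomplish
--         max_steps: Maximum steps in suggested workflow
--
--     Returns: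
--         [
--             {'module_id': 'browser.launch', 'purpose': 'Start browser'},
--             {'module_id': 'browser.goto', 'purpose': 'Navigate to URL'},
--             ...
--         ]
--     """
--     # Simple keyword-based suggestions
--     task_lower = task_description.lower()
--     suggestions = []
--
--     # Web scraping pattern
--     if any(kw in task_lower for kw in ['scrape', 'extract', 'crawl', 'webpage', 'website']):
--         suggestions = [
--             {'module_id': 'browser.launch', 'purpose': 'Start browser'},
--             {'module_id': 'browser.goto', 'purpose': 'Navigate to target URL'},
--             {'module_id': 'browser.wait', 'purpose': 'Wait for content to load'},
--             {'module_id': 'browser.extract', 'purpose': 'Extract data from page'},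
--             {'module_id': 'browser.close', 'purpose': 'Close browser'},
--         ]
--
--     # API call pattern
--     elif any(kw in task_lower for kw in ['api', 'request', 'fetch', 'endpoint']):
--         suggestions = [
--             {'module_id': 'http.request', 'purpose': 'Make HTTP request'},
--             {'module_id': 'data.json.parse', 'purpose': 'Parse response JSON'},
--         ]
--
--     # Notification pattern
--     elif any(kw in task_lower for kw in ['notify', 'alert', 'send', 'message', 'email']):
--         suggestions = [
--             {'module_id': 'notification.email.send', 'purpose': 'Send notification'},
--         ]
--
--     return suggestions[:max_steps]
-- ===== SOURCE B (Python) =====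
-- _SCRAPE_WF = [
--     {'module_id': 'browser.launch', 'purpose': 'Start browser'},
--     {'module_id': 'browser.goto', 'purpose': 'Navigate to target URL'},
--     {'module_id': 'browser.wait', 'purpose': 'Wait for content to load'},
--     {'module_id': 'browser.extract', 'purpose': 'Extract data from page'},
--     {'module_id': 'browser.close', 'purpose': 'Close browser'},
-- ]
-- _API_WF = [
--     {'module_id': 'http.request', 'purpose': 'Make HTTP request'},
--     {'module_id': 'data.json.parse', 'purpose': 'Parse response JSON'},
-- ]
-- _NOTIFY_WF = [
--     {'module_id': 'notification.email.send', 'purpose': 'Send notification'},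
-- ]
-- _WORKFLOWS = [_SCRAPE_WF, _API_WF, _NOTIFY_WF]
--
-- # one flat keyword -> group-index table; group index = priority
-- _KEYWORD_GROUP = [
--     ('scrape', 0), ('extract', 0), ('crawl', 0), ('webpage', 0), ('website', 0),
--     ('api', 1), ('request', 1), ('fetch', 1), ('endpoint', 1),
--     ('notify', 2), ('alert', 2), ('send', 2), ('message', 2), ('email', 2),
-- ]
--
--
-- def get_suggested_workflow(task_description, max_steps=5):
--     text = task_description.lower()
--     hits = [g for kw, g in _KEYWORD_GROUP if kw in text]
--     if not hits:
--         return []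
--     return _WORKFLOWS[min(hits)][:max_steps]
-- ===== Notes on version B (the rewrite author's own statement) =====
-- stated objective: alternative
-- what changed: Instead of an ordered if/elif first-match cascade, B flattens every keyword into one keyword->group-index table, collects ALL matching group indices in a single comprehension, and selects the workflow by the MINIMUM matched index into a workflow array (priority = index), so there is no branch order or short-circuit at all.
import Mathlib
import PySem

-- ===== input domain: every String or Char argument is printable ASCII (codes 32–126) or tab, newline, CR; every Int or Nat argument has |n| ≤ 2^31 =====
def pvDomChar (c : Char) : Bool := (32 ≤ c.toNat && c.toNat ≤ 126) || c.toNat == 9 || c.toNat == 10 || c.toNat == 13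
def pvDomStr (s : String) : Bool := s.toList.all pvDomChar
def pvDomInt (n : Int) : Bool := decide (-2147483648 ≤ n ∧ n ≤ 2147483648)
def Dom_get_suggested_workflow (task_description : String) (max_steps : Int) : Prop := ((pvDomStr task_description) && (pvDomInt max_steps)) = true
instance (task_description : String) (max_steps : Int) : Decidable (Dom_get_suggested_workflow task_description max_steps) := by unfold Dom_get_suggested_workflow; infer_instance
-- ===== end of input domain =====

-- B replaces A's ordered if/elif keyword cascade by a flat keyword->group-index table:
-- it collects ALL matching group indices and picks the MINIMUM one into a workflow array
-- (objective: alternative; same cost).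


-- ===== PORT A =====
-- A: lowercase the task, then an if/elif cascade over three inline keyword groups,
-- assigning `suggestions`, finally sliced by suggestions[:max_steps].
def pvScrapeWf : List (List (String × String)) :=
  [[("module_id", "browser.launch"), ("purpose", "Start browser")],
   [("module_id", "browser.goto"), ("purpose", "Navigate to target URL")],
   [("module_id", "browser.wait"), ("purpose", "Wait for content to load")],
   [("module_id", "browser.extract"), ("purpose", "Extract data from page")],
   [("module_id", "browser.close"), ("purpose", "Close browser")]]

def pvApiWf : List (List (String × String)) :=
  [[("module_id", "http.request"), ("purpose", "Make HTTP request")],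
   [("module_id", "data.json.parse"), ("purpose", "Parse response JSON")]]

def pvNotifyWf : List (List (String × String)) :=
  [[("module_id", "notification.email.send"), ("purpose", "Send notification")]]

def get_suggested_workflow (task_description : String) (max_steps : Int) : List (List (String × String)) :=
  let task_lower := PySem.Str.lower task_description
  let suggestions : List (List (String × String)) :=
    if (["scrape", "extract", "crawl", "webpage", "website"].any fun kw => PySem.Str.isIn kw task_lower) then
      pvScrapeWf
    else if (["api", "request", "fetch", "endpoint"].any fun kw => PySem.Str.isIn kw task_lower) then
      pvApiWf
    else if (["notify", "alert", "send", "message", "email"].any fun kw => PySem.Str.isIn kw task_lower) then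
      pvNotifyWf
    else []
  PySem.List.slice suggestions none (some max_steps)

-- ===== PORT B =====
-- B: one flat keyword -> group-index table; collect all matching group indices,
-- take the minimum, index into the workflow array, then slice.
def pvWorkflows : List (List (List (String × String))) := [pvScrapeWf, pvApiWf, pvNotifyWf]

def pvKeywordGroup : List (String × Int) :=
  [("scrape", 0), ("extract", 0), ("crawl", 0), ("webpage", 0), ("website", 0),
   ("api", 1), ("request", 1), ("fetch", 1), ("endpoint", 1),
   ("notify", 2), ("alert", 2), ("send", 2), ("message", 2), ("email", 2)]

def get_suggested_workflow_alt (task_description : String) (max_steps : Int) : List (List (String × String)) :=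
  let text := PySem.Str.lower task_description
  let hits : List Int :=
    pvKeywordGroup.filterMap (fun p => if PySem.Str.isIn p.1 text then some p.2 else none)
  if hits.isEmpty then []
  else
    match PySem.List.min? hits (fun g => g) with
    | some g =>
        -- _WORKFLOWS[min(hits)]: the index is always 0, 1 or 2, hence in range
        PySem.List.slice ((PySem.List.pyGet? pvWorkflows g).getD []) none (some max_steps)
    | none => []

-- ===== PRECONDITION & SPEC =====
def Spec_get_suggested_workflow (task_description : String) (max_steps : Int) (out : List (List (String × String))) : Prop := out = get_suggested_workflow_alt task_description max_steps
instance (task_description : String) (max_steps : Int) (out : List (List (String × String))) : Decidable (Spec_get_suggested_workflow task_description max_steps out) := by unfold Spec_get_suggested_workflow; infer_instance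

-- ===== CLAIM =====
def Claim_equal_get_suggested_workflow : Prop := ∀ (task_description : String) (max_steps : Int), Dom_get_suggested_workflow task_description max_steps → Spec_get_suggested_workflow task_description max_steps (get_suggested_workflow task_description max_steps)

-- ===== LEMMAS AND PROOFS =====

-- membership in B's `hits` list, phrased by group
theorem mem_hits_iff (text : String) (g : Int) :
    g ∈ pvKeywordGroup.filterMap (fun p => if PySem.Str.isIn p.1 text then some p.2 else none) ↔
      ((g = 0 ∧ (["scrape", "extract", "crawl", "webpage", "website"].any fun kw => PySem.Str.isIn kw text) = true) ∨
       (g = 1 ∧ (["api", "request", "fetch", "endpoint"].any fun kw => PySem.Str.isIn kw text) = true) ∨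
       (g = 2 ∧ (["notify", "alert", "send", "message", "email"].any fun kw => PySem.Str.isIn kw text) = true)) := by
  simp only [pvKeywordGroup, List.mem_filterMap, List.mem_cons, List.not_mem_nil, or_false,
    List.any_cons, List.any_nil, Bool.or_false, Bool.or_eq_true]
  constructor
  · rintro ⟨a, ha, hfa⟩
    rcases ha with rfl|rfl|rfl|rfl|rfl|rfl|rfl|rfl|rfl|rfl|rfl|rfl|rfl|rfl <;>
      · split at hfa
        · simp_all
          try tauto
        · simp_all
  · rintro (⟨rfl, h⟩|⟨rfl, h⟩|⟨rfl, h⟩)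
    · rcases h with h|h|h|h|h
      exacts [⟨("scrape", 0), by tauto, by simp_all⟩, ⟨("extract", 0), by tauto, by simp_all⟩,
        ⟨("crawl", 0), by tauto, by simp_all⟩, ⟨("webpage", 0), by tauto, by simp_all⟩,
        ⟨("website", 0), by tauto, by simp_all⟩]
    · rcases h with h|h|h|h
      exacts [⟨("api", 1), by tauto, by simp_all⟩, ⟨("request", 1), by tauto, by simp_all⟩,
        ⟨("fetch", 1), by tauto, by simp_all⟩, ⟨("endpoint", 1), by tauto, by simp_all⟩]
    · rcases h with h|h|h|h|h
      exacts [⟨("notify", 2), by tauto, by simp_all⟩, ⟨("alert", 2), by tauto, by simp_all⟩,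
        ⟨("send", 2), by tauto, by simp_all⟩, ⟨("message", 2), by tauto, by simp_all⟩,
        ⟨("email", 2), by tauto, by simp_all⟩]

-- the minimum of `hits` is g whenever g ∈ hits and nothing smaller can be in it
theorem min_hits_eq (text : String) (g : Int)
    (hmem : g ∈ pvKeywordGroup.filterMap (fun p => if PySem.Str.isIn p.1 text then some p.2 else none))
    (hlow : ∀ m ∈ pvKeywordGroup.filterMap (fun p => if PySem.Str.isIn p.1 text then some p.2 else none), g ≤ m) :
    PySem.List.min? (pvKeywordGroup.filterMap (fun p => if PySem.Str.isIn p.1 text then some p.2 else none)) (fun x => x) = some g := by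
  cases hmin : PySem.List.min? (pvKeywordGroup.filterMap (fun p => if PySem.Str.isIn p.1 text then some p.2 else none)) (fun x => x) with
  | none =>
      rw [PySem.List.min?_eq_none_iff] at hmin
      rw [hmin] at hmem
      cases hmem
  | some m =>
      have hm := PySem.List.min?_mem hmin
      have h1 : m ≤ g := PySem.List.min?_isMin hmin g hmem
      have h2 : g ≤ m := hlow m hm
      change m ≤ g at h1
      have : m = g := le_antisymm h1 h2
      rw [this]

theorem get_suggested_workflow_spec : Claim_equal_get_suggested_workflow := by
  intro td ms _
  unfold Spec_get_suggested_workflow get_suggested_workflow get_suggested_workflow_alt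
  by_cases h1 : (["scrape", "extract", "crawl", "webpage", "website"].any fun kw => PySem.Str.isIn kw (PySem.Str.lower td)) = true
  · have hmem := (mem_hits_iff (PySem.Str.lower td) 0).2 (Or.inl ⟨rfl, h1⟩)
    have hmin := min_hits_eq (PySem.Str.lower td) 0 hmem (by
      intro m hm
      rcases (mem_hits_iff (PySem.Str.lower td) m).1 hm with ⟨rfl, _⟩ | ⟨rfl, _⟩ | ⟨rfl, _⟩ <;> omega)
    have hne : (pvKeywordGroup.filterMap fun p => if PySem.Str.isIn p.1 (PySem.Str.lower td) then some p.2 else none).isEmpty = false := by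
      rw [List.isEmpty_eq_false_iff]
      exact List.ne_nil_of_mem hmem
    simp only [h1, if_true, hne, Bool.false_eq_true, if_false, hmin]
    rfl
  · by_cases h2 : (["api", "request", "fetch", "endpoint"].any fun kw => PySem.Str.isIn kw (PySem.Str.lower td)) = true
    · have hmem := (mem_hits_iff (PySem.Str.lower td) 1).2 (Or.inr (Or.inl ⟨rfl, h2⟩))
      have hmin := min_hits_eq (PySem.Str.lower td) 1 hmem (by
        intro m hm
        rcases (mem_hits_iff (PySem.Str.lower td) m).1 hm with ⟨rfl, hc⟩ | ⟨rfl, _⟩ | ⟨rfl, _⟩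
        · exact absurd hc h1
        · omega
        · omega)
      have hne : (pvKeywordGroup.filterMap fun p => if PySem.Str.isIn p.1 (PySem.Str.lower td) then some p.2 else none).isEmpty = false := by
        rw [List.isEmpty_eq_false_iff]
        exact List.ne_nil_of_mem hmem
      simp only [h1, Bool.false_eq_true, if_false, h2, if_true, hne, hmin]
      rfl
    · by_cases h3 : (["notify", "alert", "send", "message", "email"].any fun kw => PySem.Str.isIn kw (PySem.Str.lower td)) = true
      · have hmem := (mem_hits_iff (PySem.Str.lower td) 2).2 (Or.inr (Or.inr ⟨rfl, h3⟩))
        have hmin := min_hits_eq (PySem.Str.lower td) 2 hmem (by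
          intro m hm
          rcases (mem_hits_iff (PySem.Str.lower td) m).1 hm with ⟨rfl, hc⟩ | ⟨rfl, hc⟩ | ⟨rfl, _⟩
          · exact absurd hc h1
          · exact absurd hc h2
          · omega)
        have hne : (pvKeywordGroup.filterMap fun p => if PySem.Str.isIn p.1 (PySem.Str.lower td) then some p.2 else none).isEmpty = false := by
          rw [List.isEmpty_eq_false_iff]
          exact List.ne_nil_of_mem hmem
        simp only [h1, h2, Bool.false_eq_true, if_false, h3, if_true, hne, hmin]
        rfl
      · have hnil : (pvKeywordGroup.filterMap fun p => if PySem.Str.isIn p.1 (PySem.Str.lower td) then some p.2 else none) = [] := by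
          rw [List.eq_nil_iff_forall_not_mem]
          intro m hm
          rcases (mem_hits_iff (PySem.Str.lower td) m).1 hm with ⟨_, hc⟩ | ⟨_, hc⟩ | ⟨_, hc⟩
          · exact h1 hc
          · exact h2 hc
          · exact h3 hc
        simp only [h1, h2, h3, Bool.false_eq_true, if_false, hnil, List.isEmpty_nil, if_true]
        simp [PySem.List.slice]
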